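-- pv_equiv track=rewrite | github.com/tacitvenom/genomics_algo | genomics_algo/approximate_matching_algorithms/dynamic_programming.py | get_occurences_with_dynamic_programming
-- ===== SOURCE A (Python) =====
-- from typing import List
--
-- def get_occurences_with_dynamic_programming(
--     pattern: str, text: str, max_mismatches: int
-- ) -> List[int]:
--     """Get indices of all occurences of the string `pattern` in the string `text` using
--     approximate matching (Levenshtein distance is used to count the number of mismatches i.e.,
--     minimum number of edits including substitution, insertion and deletion needed in a string to
--     turn it into another)
--     >>> get_occurences_with_dynamic_programming("GCGTATGC", "TATTGGCTATACGGTT", 1)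
--     []
--     >>> get_occurences_with_dynamic_programming("GCGTATGC", "TATTGGCTATACGGTT", 2)
--     [5]
--     >>> get_occurences_with_dynamic_programming("ACT", "GACTACGGAGACT", 0)
--     [1, 10]
--     """
--     assert len(pattern) <= len(text)
--
--     # initializing a matrix for with `len(pattern) + 1` rows and `len(text) + 1` columns
--     D = [[0 for x in range(len(text) + 1)] for y in range(len(pattern) + 1)]
--
--     # fill first column
--     for i in range(len(pattern) + 1):
--         D[i][0] = i
--     # fill first row
--     for j in range(len(text) + 1):
--         D[0][j] = 0
--
--     # fill rest of the matrix
--     for i in range(1, len(pattern) + 1):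
--         for j in range(1, len(text) + 1):
--             distance_left = D[i][j - 1] + 1  # deletion in pattern
--             distance_above = D[i - 1][j] + 1  # insertion in pattern
--             distance_diagonal = D[i - 1][j - 1] + (
--                 pattern[i - 1] != text[j - 1]
--             )  # substitution
--             D[i][j] = min(distance_left, distance_above, distance_diagonal)
--
--     # minimum in the bottom-most row should be at most the value of `max_mismatches`
--     if min(D[-1]) > max_mismatches:
--         return []
--     else:
--         occurence_end_indices = []
--         for end_index, mismatch_count in enumerate(D[-1]):
--             if mismatch_count <= max_mismatches:
--                 occurence_end_indices.append(end_index)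
--
--         occurences = _backtrace_approximate_match(
--             pattern=pattern, text=text, D=D, occurence_end_indices=occurence_end_indices
--         )
--
--     return occurences
--
-- def _backtrace_approximate_match(
--     pattern: str, text: str, D: List[List[int]], occurence_end_indices: List[int]
-- ) -> List[int]:
--     """Helper function that backtraces and find the beginning index of an approximate occurence
--     provided the dynamic programmically filled matrix `D` and the list of end indices of an approximate
--     match
--
--     Args:
--         pattern (str): `pattern` to be searched in the `text`
--         text (str): `text` in which `pattern` is searched
--         D (List[List[int]]): Matrix with `len(pattern) + 1` rows and `len(text) + 1` columns with mismatch
--             information using dynamic programming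
--         occurence_end_indices (List[int]): List of indices of the end of the occurence of an approximate
--             match of `pattern` in the `text`
--
--     Returns:
--         List[int]: List of integers where the `pattern` approximately matches in the `text`
--     """
--     occurence_start_indices = []
--     for occurence_end_index in occurence_end_indices:
--         i = len(D) - 1
--         j = occurence_end_index
--         while i > 0:
--             distance_value = D[i][j]
--             distance_left = D[i][j - 1]
--             distance_above = D[i - 1][j]
--             distance_diagonal = D[i - 1][j - 1]
--             if distance_value == distance_above + 1:
--                 i -= 1
--             elif distance_value == distance_left + 1:
--                 j -= 1
--             elif distance_value == distance_diagonal + (pattern[i - 1] != text[j - 1]):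
--                 i -= 1
--                 j -= 1
--         occurence_start_indices.append(j)
--     return occurence_start_indices
-- ===== SOURCE B (Python) =====
-- def get_occurences_with_dynamic_programming(pattern, text, max_mismatches):
--     """Same result as A, but the backtrace pass is gone: alongside each edit-distance
--     value we carry the start column ("origin") of the optimal path reaching the cell,
--     chosen with the backtrace's exact priority (above, then left, then diagonal).
--     Only two (distance, origin) rows are kept at a time."""
--     assert len(pattern) <= len(text)
--     prev = [(0, j) for j in range(len(text) + 1)]
--     for i, pc in enumerate(pattern, start=1):
--         cur = [(i, prev[0][1])]
--         for j, tc in enumerate(text, start=1):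
--             above_d, above_o = prev[j]
--             left_d, left_o = cur[j - 1]
--             diag_d, diag_o = prev[j - 1]
--             d = min(left_d + 1, above_d + 1, diag_d + (pc != tc))
--             if d == above_d + 1:
--                 o = above_o
--             elif d == left_d + 1:
--                 o = left_o
--             else:
--                 o = diag_o
--             cur.append((d, o))
--         prev = cur
--     return [o for d, o in prev if d <= max_mismatches]
-- ===== Notes on version B (the rewrite author's own statement) =====
-- stated objective: alternative
-- what changed: B removes the separate backward backtrace pass: it carries a (distance, origin) pair forward through the DP with the backtrace's exact branch priority (above, left, diagonal), keeping only two rows instead of the full (m+1)x(n+1) matrix.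
import Mathlib
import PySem

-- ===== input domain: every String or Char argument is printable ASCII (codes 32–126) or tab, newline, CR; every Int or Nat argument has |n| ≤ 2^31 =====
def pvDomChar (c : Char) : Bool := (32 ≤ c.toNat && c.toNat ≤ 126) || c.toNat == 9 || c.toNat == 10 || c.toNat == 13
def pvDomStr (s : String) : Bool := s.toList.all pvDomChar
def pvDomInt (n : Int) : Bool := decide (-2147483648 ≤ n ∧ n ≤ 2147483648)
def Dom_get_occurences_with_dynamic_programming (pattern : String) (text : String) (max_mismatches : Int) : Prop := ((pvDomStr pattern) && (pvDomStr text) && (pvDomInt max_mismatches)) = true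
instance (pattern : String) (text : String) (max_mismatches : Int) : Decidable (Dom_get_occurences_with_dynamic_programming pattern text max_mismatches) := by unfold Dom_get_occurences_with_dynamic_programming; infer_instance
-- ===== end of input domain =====

-- B replaces A's separate backward backtrace pass by carrying a (distance, origin) pair
-- forward through the DP with the backtrace's exact branch priority; return values only
-- (neither program mutates its arguments).

-- ===== PORT A =====
-- (x != y) used as an int summand in Python
def pvSubCost (a b : Char) : Int := if a ≠ b then 1 else 0

-- D[i][0] = i  (one iteration of A's first-column loop)
def pvColStep (M : List (List Int)) (i : Nat) : List (List Int) :=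
  M.set i ((M.getD i []).set 0 (i : Int))

-- D[0][j] = 0  (one iteration of A's first-row loop)
def pvRowStep (M : List (List Int)) (j : Nat) : List (List Int) :=
  M.set 0 ((M.getD 0 []).set j (0 : Int))

-- the body of A's inner fill loop
def pvFillStep (p t : List Char) (i : Nat) (M : List (List Int)) (j : Nat) : List (List Int) :=
  let dl := (M.getD i []).getD (j-1) 0 + 1
  let da := (M.getD (i-1) []).getD j 0 + 1
  let dd := (M.getD (i-1) []).getD (j-1) 0 + pvSubCost (p.getD (i-1) ' ') (t.getD (j-1) ' ')
  M.set i ((M.getD i []).set j (min dl (min da dd)))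

-- the body of A's outer fill loop
def pvFillRow (p t : List Char) (M : List (List Int)) (i : Nat) : List (List Int) :=
  (List.range' 1 t.length).foldl (pvFillStep p t i) M

-- A's matrix construction: init [[0]*(n+1)]*(m+1), first column, first row, fill
def pvBuildD (p t : List Char) : List (List Int) :=
  let D0 : List (List Int) := (List.range (p.length+1)).map (fun _ => (List.range (t.length+1)).map (fun _ => (0:Int)))
  let D1 := (List.range (p.length+1)).foldl pvColStep D0
  let D2 := (List.range (t.length+1)).foldl pvRowStep D1
  (List.range' 1 p.length).foldl (pvFillRow p t) D2

-- the while-loop of _backtrace_approximate_match; fuel bounds the iteration count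
-- (each iteration of the Python loop on the filled matrix strictly decreases i+j, so
-- fuel m+n+1 is never exhausted; the final else mirrors a non-terminating Python state)
def pvBtLoop (p t : List Char) (D : List (List Int)) : Nat → Int → Int → Int
  | 0, _, j => j
  | fuel+1, i, j =>
    if i > 0 then
      let rowi := (PySem.List.pyGet? D i).getD []
      let rowi1 := (PySem.List.pyGet? D (i-1)).getD []
      let dv := (PySem.List.pyGet? rowi j).getD 0
      let dl := (PySem.List.pyGet? rowi (j-1)).getD 0
      let da := (PySem.List.pyGet? rowi1 j).getD 0
      let dd := (PySem.List.pyGet? rowi1 (j-1)).getD 0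
      if dv = da + 1 then pvBtLoop p t D fuel (i-1) j
      else if dv = dl + 1 then pvBtLoop p t D fuel i (j-1)
      else if dv = dd + pvSubCost ((PySem.List.pyGet? p (i-1)).getD ' ') ((PySem.List.pyGet? t (j-1)).getD ' ') then
        pvBtLoop p t D fuel (i-1) (j-1)
      else pvBtLoop p t D fuel i j
    else j

def get_occurences_with_dynamic_programming (pattern : String) (text : String) (max_mismatches : Int) : List Int :=
  let p := pattern.toList
  let t := text.toList
  let D := pvBuildD p t
  let last := (PySem.List.pyGet? D (-1)).getD []
  match PySem.List.min? last (fun x => x) with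
  | none => []  -- unreachable totality guard: the last row is nonempty
  | some mn =>
    if mn > max_mismatches then []
    else
      (((PySem.List.enumerate last 0).filter (fun x => decide (x.2 ≤ max_mismatches))).map (fun x => x.1)).map
        (fun e => pvBtLoop p t D (p.length + t.length + 1) (p.length : Int) e)

-- ===== PORT B =====
-- the body of B's inner loop: one (distance, origin) cell
def pvAltInner (pc : Char) (prev cur : List (Int × Int)) (jtc : Int × Char) : List (Int × Int) :=
  let a := PySem.List.pyGetD prev jtc.1 (0, 0)
  let l := PySem.List.pyGetD cur (jtc.1 - 1) (0, 0)
  let g := PySem.List.pyGetD prev (jtc.1 - 1) (0, 0)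
  let d := min (l.1 + 1) (min (a.1 + 1) (g.1 + pvSubCost pc jtc.2))
  let o := if d = a.1 + 1 then a.2 else if d = l.1 + 1 then l.2 else g.2
  cur ++ [(d, o)]

-- the body of B's outer loop: one full (distance, origin) row
def pvAltOuter (t : List Char) (prev : List (Int × Int)) (ipc : Int × Char) : List (Int × Int) :=
  (PySem.List.enumerate t 1).foldl (pvAltInner ipc.2 prev) [(ipc.1, (PySem.List.pyGetD prev 0 (0, 0)).2)]

def get_occurences_with_dynamic_programming_alt (pattern : String) (text : String) (max_mismatches : Int) : List Int :=
  let p := pattern.toList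
  let t := text.toList
  let prev0 : List (Int × Int) := (PySem.List.pyRange 0 ((t.length : Int) + 1) 1).map (fun j => ((0:Int), j))
  let fin := (PySem.List.enumerate p 1).foldl (pvAltOuter t) prev0
  (fin.filter (fun x => decide (x.1 ≤ max_mismatches))).map (fun x => x.2)

-- ===== PRECONDITION & SPEC =====
-- Pre_ excludes exactly the inputs where A raises AssertionError (len(pattern) > len(text));
-- B's assert raises there too.
def Pre_get_occurences_with_dynamic_programming (pattern : String) (text : String) (max_mismatches : Int) : Prop :=
  pattern.toList.length ≤ text.toList.length
instance (pattern : String) (text : String) (max_mismatches : Int) : Decidable (Pre_get_occurences_with_dynamic_programming pattern text max_mismatches) := by unfold Pre_get_occurences_with_dynamic_programming; infer_instance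

def pvWitness_get_occurences_with_dynamic_programming : String × String × Int := ("ACT", "GACTACGGAGACT", 0)

def Spec_get_occurences_with_dynamic_programming (pattern : String) (text : String) (max_mismatches : Int) (out : List Int) : Prop := out = get_occurences_with_dynamic_programming_alt pattern text max_mismatches
instance (pattern : String) (text : String) (max_mismatches : Int) (out : List Int) : Decidable (Spec_get_occurences_with_dynamic_programming pattern text max_mismatches out) := by unfold Spec_get_occurences_with_dynamic_programming; infer_instance

-- ===== CLAIM (what is proved, stated in full; the proofs are below) =====
def Claim_equal_get_occurences_with_dynamic_programming : Prop := ∀ (pattern : String) (text : String) (max_mismatches : Int), Dom_get_occurences_with_dynamic_programming pattern text max_mismatches → Pre_get_occurences_with_dynamic_programming pattern text max_mismatches → Spec_get_occurences_with_dynamic_programming pattern text max_mismatches (get_occurences_with_dynamic_programming pattern text max_mismatches)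

-- ===== LEMMAS AND PROOFS =====

-- the mathematical edit-distance table both programs compute
def pvDm (p t : List Char) : Nat → Nat → Int
  | 0, _ => 0
  | i+1, 0 => (i:Int) + 1
  | i+1, j+1 => min (pvDm p t (i+1) j + 1)
      (min (pvDm p t i (j+1) + 1) (pvDm p t i j + pvSubCost (p.getD i ' ') (t.getD j ' ')))
  termination_by i j => (i, j)

-- the origin (start column) of the backtrace from (i, j), branch priority above > left > diagonal
def pvOm (p t : List Char) : Nat → Nat → Int
  | 0, j => (j:Int)
  | i+1, 0 => pvOm p t i 0
  | i+1, j+1 =>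
    if pvDm p t (i+1) (j+1) = pvDm p t i (j+1) + 1 then pvOm p t i (j+1)
    else if pvDm p t (i+1) (j+1) = pvDm p t (i+1) j + 1 then pvOm p t (i+1) j
    else pvOm p t i j
  termination_by i j => (i, j)

def pvE (M : List (List Int)) (a b : Nat) : Int := (M.getD a []).getD b 0

theorem pvDm_zero_right (p t : List Char) (i : Nat) : pvDm p t i 0 = (i : Int) := by
  cases i <;> simp [pvDm]

theorem pv_getD_set (l : List Int) (i : Nat) (v : Int) (b : Nat) (h : i < l.length) :
    (l.set i v).getD b 0 = if b = i then v else l.getD b 0 := by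
  simp only [List.getD_eq_getElem?_getD, List.getElem?_set]
  by_cases hb : b = i
  · simp [hb, h]
  · simp [hb, show ¬ (i = b) from fun hh => hb hh.symm]

theorem pv_getD_set_row (M : List (List Int)) (i : Nat) (r : List Int) (a : Nat) (hi : i < M.length) :
    (M.set i r).getD a [] = if a = i then r else M.getD a [] := by
  simp only [List.getD_eq_getElem?_getD, List.getElem?_set]
  by_cases hb : a = i
  · simp [hb, hi]
  · simp [hb, show ¬ (i = a) from fun hh => hb hh.symm]

theorem pvE_set (M : List (List Int)) (i j : Nat) (v : Int) (a b : Nat)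
    (hi : i < M.length) (hj : j < (M.getD i []).length) :
    pvE (M.set i ((M.getD i []).set j v)) a b = if a = i ∧ b = j then v else pvE M a b := by
  unfold pvE
  rw [pv_getD_set_row _ _ _ _ hi]
  by_cases ha : a = i
  · subst ha
    rw [if_pos rfl, pv_getD_set _ _ _ _ hj]
    by_cases hb : b = j <;> simp [hb]
  · simp [ha]

theorem pvE_set_len (M : List (List Int)) (i j : Nat) (v : Int) (a : Nat) (hi : i < M.length) :
    ((M.set i ((M.getD i []).set j v)).getD a []).length = (M.getD a []).length := by
  rw [pv_getD_set_row _ _ _ _ hi]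
  by_cases ha : a = i <;> simp [ha]

theorem pv_set_len (M : List (List Int)) (i : Nat) (r : List Int) : (M.set i r).length = M.length := by
  simp

-- the initial matrix: all zeros
theorem pv_D0 (m n : Nat) :
    ((List.range (m+1)).map (fun _ => (List.range (n+1)).map (fun _ => (0:Int)))).length = m+1 ∧
    (∀ a, a < m+1 → (((List.range (m+1)).map (fun _ => (List.range (n+1)).map (fun _ => (0:Int)))).getD a []).length = n+1) ∧
    (∀ a b, pvE ((List.range (m+1)).map (fun _ => (List.range (n+1)).map (fun _ => (0:Int)))) a b = 0) := by
  refine ⟨by simp, ?_, ?_⟩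
  · intro a ha
    simp [List.getD_eq_getElem?_getD, ha]
  · intro a b
    unfold pvE
    by_cases ha : a < m+1
    · by_cases hb : b < n+1 <;>
        simp [List.getD_eq_getElem?_getD, ha, hb]
    · simp [List.getD_eq_getElem?_getD, ha]

-- first-column loop: sets D[a][0] = a for processed rows
theorem pv_initCol (m n : Nat) : ∀ (cnt s : Nat) (M : List (List Int)), s + cnt = m+1 →
    M.length = m+1 → (∀ a, a < m+1 → (M.getD a []).length = n+1) →
    (∀ a b, pvE M a b = if a < s ∧ b = 0 then (a:Int) else 0) →
    ((List.range' s cnt).foldl pvColStep M).length = m+1 ∧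
    (∀ a, a < m+1 → (((List.range' s cnt).foldl pvColStep M).getD a []).length = n+1) ∧
    (∀ a b, pvE ((List.range' s cnt).foldl pvColStep M) a b = if a < s + cnt ∧ b = 0 then (a:Int) else 0) := by
  intro cnt
  induction cnt with
  | zero => intro s M hs h1 h2 h3; simp only [List.range'_zero, List.foldl_nil]; exact ⟨h1, h2, h3⟩
  | succ c ih =>
    intro s M hs h1 h2 h3
    rw [List.range'_succ, List.foldl_cons]
    have hsM : s < M.length := by omega
    have hrl : (0:Nat) < (M.getD s []).length := by rw [h2 s (by omega)]; omega
    have e1 : (pvColStep M s).length = m+1 := by unfold pvColStep; rw [pv_set_len, h1]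
    have e2 : ∀ a, a < m+1 → ((pvColStep M s).getD a []).length = n+1 := by
      intro a ha; unfold pvColStep; rw [pvE_set_len _ _ _ _ _ hsM]; exact h2 a ha
    have e3 : ∀ a b, pvE (pvColStep M s) a b = if a < s + 1 ∧ b = 0 then (a:Int) else 0 := by
      intro a b
      unfold pvColStep
      rw [pvE_set _ _ _ _ _ _ hsM hrl, h3]
      by_cases hab : a = s ∧ b = 0
      · obtain ⟨rfl, rfl⟩ := hab; simp
      · rw [if_neg hab]
        by_cases h4 : a < s ∧ b = 0
        · rw [if_pos h4, if_pos ⟨by omega, h4.2⟩]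
        · rw [if_neg h4, if_neg (by omega)]
    have := ih (s+1) (pvColStep M s) (by omega) e1 e2 e3
    simpa [Nat.add_assoc, Nat.add_comm 1 c] using this

-- first-row loop: rewrites zeros over row 0, leaving  D[a][b] = if b = 0 then a else 0
theorem pv_initRow (m n : Nat) : ∀ (cnt s : Nat) (M : List (List Int)), s + cnt = n+1 →
    M.length = m+1 → (∀ a, a < m+1 → (M.getD a []).length = n+1) →
    (∀ a b, a < m+1 → pvE M a b = if b = 0 then (a:Int) else 0) →
    ((List.range' s cnt).foldl pvRowStep M).length = m+1 ∧
    (∀ a, a < m+1 → (((List.range' s cnt).foldl pvRowStep M).getD a []).length = n+1) ∧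
    (∀ a b, a < m+1 → pvE ((List.range' s cnt).foldl pvRowStep M) a b = if b = 0 then (a:Int) else 0) := by
  intro cnt
  induction cnt with
  | zero => intro s M hs h1 h2 h3; simp only [List.range'_zero, List.foldl_nil]; exact ⟨h1, h2, h3⟩
  | succ c ih =>
    intro s M hs h1 h2 h3
    rw [List.range'_succ, List.foldl_cons]
    have h0M : (0:Nat) < M.length := by omega
    have hrl : s < (M.getD 0 []).length := by rw [h2 0 (by omega)]; omega
    refine ih (s+1) (pvRowStep M s) (by omega) ?_ ?_ ?_
    · unfold pvRowStep; rw [pv_set_len, h1]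
    · intro a ha; unfold pvRowStep; rw [pvE_set_len _ _ _ _ _ h0M]; exact h2 a ha
    · intro a b ha
      unfold pvRowStep
      rw [pvE_set _ _ _ _ _ _ h0M hrl, h3 a b ha]
      by_cases hab : a = 0 ∧ b = s
      · obtain ⟨rfl, rfl⟩ := hab; simp
      · rw [if_neg hab]

-- inner fill loop: computes row i of the edit-distance table
theorem pv_fillInner (p t : List Char) (i : Nat) (h1 : 1 ≤ i) (him : i < p.length + 1) :
    ∀ (cnt j0 : Nat) (M : List (List Int)), 1 ≤ j0 → j0 + cnt = t.length + 1 →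
    M.length = p.length + 1 →
    (∀ a, a < p.length + 1 → (M.getD a []).length = t.length + 1) →
    (∀ b, b < t.length + 1 → pvE M (i-1) b = pvDm p t (i-1) b) →
    (∀ b, b < j0 → pvE M i b = pvDm p t i b) →
    ((List.range' j0 cnt).foldl (pvFillStep p t i) M).length = p.length + 1 ∧
    (∀ a, a < p.length + 1 → (((List.range' j0 cnt).foldl (pvFillStep p t i) M).getD a []).length = t.length + 1) ∧
    (∀ a b, a ≠ i → pvE ((List.range' j0 cnt).foldl (pvFillStep p t i) M) a b = pvE M a b) ∧
    (∀ b, b < j0 + cnt → pvE ((List.range' j0 cnt).foldl (pvFillStep p t i) M) i b = pvDm p t i b) := by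
  intro cnt
  induction cnt with
  | zero =>
    intro j0 M hj0 hsum h1' h2' h3' h4'
    rw [List.range'_zero]
    exact ⟨h1', h2', fun a b _ => rfl, fun b hb => h4' b (by omega)⟩
  | succ c ih =>
    intro j0 M hj0 hsum h1' h2' h3' h4'
    rw [List.range'_succ, List.foldl_cons]
    have hiM : i < M.length := by omega
    have hj0n : j0 < t.length + 1 := by omega
    have hrl : j0 < (M.getD i []).length := by rw [h2' i him]; omega
    -- the freshly computed value is pvDm p t i j0
    have hval : (M.getD i []).getD (j0-1) 0 + 1 = pvDm p t i (j0-1) + 1 := by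
      rw [show (M.getD i []).getD (j0-1) 0 = pvE M i (j0-1) from rfl, h4' (j0-1) (by omega)]
    have hva : (M.getD (i-1) []).getD j0 0 + 1 = pvDm p t (i-1) j0 + 1 := by
      rw [show (M.getD (i-1) []).getD j0 0 = pvE M (i-1) j0 from rfl, h3' j0 hj0n]
    have hvd : (M.getD (i-1) []).getD (j0-1) 0 = pvDm p t (i-1) (j0-1) := by
      rw [show (M.getD (i-1) []).getD (j0-1) 0 = pvE M (i-1) (j0-1) from rfl, h3' (j0-1) (by omega)]
    have hstep : pvFillStep p t i M j0 = M.set i ((M.getD i []).set j0 (pvDm p t i j0)) := by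
      unfold pvFillStep
      rw [hval, hva, hvd]
      obtain ⟨i', rfl⟩ : ∃ i', i = i' + 1 := ⟨i - 1, by omega⟩
      obtain ⟨j', rfl⟩ : ∃ j', j0 = j' + 1 := ⟨j0 - 1, by omega⟩
      simp [pvDm]
    have e1 : (pvFillStep p t i M j0).length = p.length + 1 := by rw [hstep, pv_set_len, h1']
    have e2 : ∀ a, a < p.length + 1 → ((pvFillStep p t i M j0).getD a []).length = t.length + 1 := by
      intro a ha; rw [hstep, pvE_set_len _ _ _ _ _ hiM]; exact h2' a ha
    have e4 : ∀ b, b < j0 + 1 → pvE (pvFillStep p t i M j0) i b = pvDm p t i b := by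
      intro b hb
      rw [hstep, pvE_set _ _ _ _ _ _ hiM hrl]
      by_cases hbj : b = j0
      · subst hbj; simp
      · rw [if_neg (by simp [hbj]), h4' b (by omega)]
    have e3 : ∀ b, b < t.length + 1 → pvE (pvFillStep p t i M j0) (i-1) b = pvDm p t (i-1) b := by
      intro b hb
      rw [hstep, pvE_set _ _ _ _ _ _ hiM hrl, if_neg (by intro h; omega), h3' b hb]
    obtain ⟨r1, r2, r3, r4⟩ := ih (j0+1) (pvFillStep p t i M j0) (by omega) (by omega) e1 e2 e3 e4
    refine ⟨r1, r2, ?_, ?_⟩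
    · intro a b ha
      rw [r3 a b ha, hstep, pvE_set _ _ _ _ _ _ hiM hrl, if_neg (by intro h; exact ha h.1)]
    · intro b hb; exact r4 b (by omega)

-- outer fill loop: completes the edit-distance table
theorem pv_fillOuter (p t : List Char) : ∀ (cnt i0 : Nat) (M : List (List Int)), 1 ≤ i0 → i0 + cnt = p.length + 1 →
    M.length = p.length + 1 →
    (∀ a, a < p.length + 1 → (M.getD a []).length = t.length + 1) →
    (∀ a b, a < i0 → b < t.length + 1 → pvE M a b = pvDm p t a b) →
    (∀ a, a < p.length + 1 → pvE M a 0 = (a:Int)) →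
    ((List.range' i0 cnt).foldl (pvFillRow p t) M).length = p.length + 1 ∧
    (∀ a, a < p.length + 1 → (((List.range' i0 cnt).foldl (pvFillRow p t) M).getD a []).length = t.length + 1) ∧
    (∀ a b, a < p.length + 1 → b < t.length + 1 → pvE ((List.range' i0 cnt).foldl (pvFillRow p t) M) a b = pvDm p t a b) := by
  intro cnt
  induction cnt with
  | zero =>
    intro i0 M hi0 hsum h1 h2 h3 h4
    simp only [List.range'_zero, List.foldl_nil]
    exact ⟨h1, h2, fun a b ha hb => h3 a b (by omega) hb⟩
  | succ c ih =>
    intro i0 M hi0 hsum h1 h2 h3 h4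
    rw [List.range'_succ, List.foldl_cons]
    have hi0m : i0 < p.length + 1 := by omega
    obtain ⟨r1, r2, r3, r4⟩ := pv_fillInner p t i0 hi0 hi0m t.length 1 M (by omega) (by omega) h1 h2
      (fun b hb => h3 (i0-1) b (by omega) hb)
      (fun b hb => by
        have hb0 : b = 0 := by omega
        subst hb0; rw [h4 i0 hi0m, pvDm_zero_right])
    refine ih (i0+1) (pvFillRow p t M i0) (by omega) (by omega) r1 r2 ?_ ?_
    · intro a b ha hb
      by_cases hai : a = i0
      · subst hai; exact r4 b (by omega)
      · rw [show pvFillRow p t M i0 = (List.range' 1 t.length).foldl (pvFillStep p t i0) M from rfl] at *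
        rw [r3 a b hai]; exact h3 a b (by omega) hb
    · intro a ha
      by_cases hai : a = i0
      · subst hai
        rw [show pvE (pvFillRow p t M a) a 0 = pvE ((List.range' 1 t.length).foldl (pvFillStep p t a) M) a 0 from rfl,
            r4 0 (by omega), pvDm_zero_right]
      · rw [show pvFillRow p t M i0 = (List.range' 1 t.length).foldl (pvFillStep p t i0) M from rfl,
            r3 a 0 hai]
        exact h4 a ha

-- the built matrix is exactly the edit-distance table
theorem pv_buildD (p t : List Char) :
    (pvBuildD p t).length = p.length + 1 ∧
    (∀ a, a < p.length + 1 → ((pvBuildD p t).getD a []).length = t.length + 1) ∧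
    (∀ a b, a < p.length + 1 → b < t.length + 1 → pvE (pvBuildD p t) a b = pvDm p t a b) := by
  obtain ⟨d1, d2, d3⟩ := pv_D0 p.length t.length
  obtain ⟨c1, c2, c3⟩ := pv_initCol p.length t.length (p.length+1) 0 _ (by omega) d1 d2
    (fun a b => by rw [d3 a b]; simp)
  obtain ⟨w1, w2, w3⟩ := pv_initRow p.length t.length (t.length+1) 0 _ (by omega) c1 c2
    (fun a b ha => by rw [c3 a b]; by_cases hb : b = 0 <;> simp [hb, ha])
  obtain ⟨f1, f2, f3⟩ := pv_fillOuter p t p.length 1 _ (by omega) (by omega) w1 w2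
    (fun a b ha hb => by
      have ha0 : a = 0 := by omega
      subst ha0
      rw [w3 0 b (by omega)]
      by_cases hb0 : b = 0 <;> simp [hb0, pvDm])
    (fun a ha => by rw [w3 a 0 ha]; simp)
  rw [show (List.range' 0 (p.length+1) : List Nat) = List.range (p.length+1) from List.range_eq_range'.symm] at c3
  rw [show (List.range' 0 (t.length+1) : List Nat) = List.range (t.length+1) from List.range_eq_range'.symm] at w3
  rw [show (List.range' 0 (t.length+1) : List Nat) = List.range (t.length+1) from List.range_eq_range'.symm, show (List.range' 0 (p.length+1) : List Nat) = List.range (p.length+1) from List.range_eq_range'.symm] at f1 f2 f3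
  simp only [pvBuildD]
  exact ⟨f1, f2, f3⟩

-- the backtrace loop on the filled matrix computes the origin table
theorem pv_bt (p t : List Char) (D : List (List Int))
    (hE : ∀ a b, a < p.length + 1 → b < t.length + 1 → pvE D a b = pvDm p t a b) :
    ∀ (fuel i j : Nat), i ≤ p.length → j ≤ t.length → i + j < fuel →
    pvBtLoop p t D fuel (i : Int) (j : Int) = pvOm p t i j := by
  intro fuel
  induction fuel with
  | zero => intro i j _ _ h; omega
  | succ f ih =>
    intro i j hi hj hf
    cases i with
    | zero => simp [pvBtLoop, pvOm]
    | succ i' =>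
      have c1 : ((i'+1 : Nat) : Int) - 1 = ((i' : Nat) : Int) := by push_cast; ring
      have hgrow : ∀ a : Nat, a < p.length + 1 → (PySem.List.pyGet? D ((a : Nat) : Int)).getD [] = D.getD a [] := by
        intro a _; rw [PySem.List.pyGet?_natCast, ← List.getD_eq_getElem?_getD]
      have hget : ∀ a b : Nat, a < p.length + 1 → b < t.length + 1 →
          (PySem.List.pyGet? (D.getD a []) ((b : Nat) : Int)).getD 0 = pvDm p t a b := by
        intro a b ha hb
        rw [PySem.List.pyGet?_natCast, ← List.getD_eq_getElem?_getD]
        exact hE a b ha hb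
      simp only [pvBtLoop]
      rw [if_pos (by exact_mod_cast Nat.succ_pos i')]
      rw [c1, hgrow (i'+1) (by omega), hgrow i' (by omega)]
      cases j with
      | zero =>
        rw [hget (i'+1) 0 (by omega) (by omega), hget i' 0 (by omega) (by omega)]
        rw [if_pos (by rw [pvDm_zero_right, pvDm_zero_right]; push_cast; ring)]
        rw [ih i' 0 (by omega) (by omega) (by omega)]
        simp [pvOm]
      | succ j' =>
        have c2 : ((j'+1 : Nat) : Int) - 1 = ((j' : Nat) : Int) := by push_cast; ring
        rw [c2, hget (i'+1) (j'+1) (by omega) (by omega), hget i' (j'+1) (by omega) (by omega),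
            hget (i'+1) j' (by omega) (by omega), hget i' j' (by omega) (by omega)]
        rw [show (PySem.List.pyGet? p ((i' : Nat) : Int)).getD ' ' = p.getD i' ' ' by
              rw [PySem.List.pyGet?_natCast, ← List.getD_eq_getElem?_getD],
            show (PySem.List.pyGet? t ((j' : Nat) : Int)).getD ' ' = t.getD j' ' ' by
              rw [PySem.List.pyGet?_natCast, ← List.getD_eq_getElem?_getD]]
        by_cases h1 : pvDm p t (i'+1) (j'+1) = pvDm p t i' (j'+1) + 1
        · rw [if_pos h1, ih i' (j'+1) (by omega) (by omega) (by omega)]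
          rw [show pvOm p t (i'+1) (j'+1) = pvOm p t i' (j'+1) by rw [pvOm, if_pos h1]]
        · rw [if_neg h1]
          by_cases h2 : pvDm p t (i'+1) (j'+1) = pvDm p t (i'+1) j' + 1
          · rw [if_pos h2, ih (i'+1) j' (by omega) (by omega) (by omega)]
            rw [show pvOm p t (i'+1) (j'+1) = pvOm p t (i'+1) j' by rw [pvOm, if_neg h1, if_pos h2]]
          · have h3 : pvDm p t (i'+1) (j'+1) = pvDm p t i' j' + pvSubCost (p.getD i' ' ') (t.getD j' ' ') := by
              have e : pvDm p t (i'+1) (j'+1) = min (pvDm p t (i'+1) j' + 1)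
                  (min (pvDm p t i' (j'+1) + 1) (pvDm p t i' j' + pvSubCost (p.getD i' ' ') (t.getD j' ' '))) := by
                rw [pvDm]
              rcases min_choice (pvDm p t (i'+1) j' + 1)
                  (min (pvDm p t i' (j'+1) + 1) (pvDm p t i' j' + pvSubCost (p.getD i' ' ') (t.getD j' ' '))) with hc | hc
              · exact absurd (e.trans hc) h2
              · rcases min_choice (pvDm p t i' (j'+1) + 1)
                    (pvDm p t i' j' + pvSubCost (p.getD i' ' ') (t.getD j' ' ')) with hc2 | hc2
                · exact absurd (e.trans (hc.trans hc2)) h1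
                · exact (e.trans (hc.trans hc2))
            rw [if_neg h2, if_pos h3, ih i' j' (by omega) (by omega) (by omega)]
            rw [show pvOm p t (i'+1) (j'+1) = pvOm p t i' j' by rw [pvOm, if_neg h1, if_neg h2]]

-- B's inner loop extends the current (distance, origin) row cell by cell
theorem pv_B_inner (p t : List Char) (i' : Nat) (prev : List (Int × Int))
    (hprev : ∀ q, q < t.length + 1 → prev.getD q (0,0) = (pvDm p t i' q, pvOm p t i' q)) :
    ∀ (l : List Char) (s : Nat) (cur : List (Int × Int)),
    t.drop s = l → s + l.length = t.length → cur.length = s + 1 →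
    (∀ q, q < s + 1 → cur.getD q (0,0) = (pvDm p t (i'+1) q, pvOm p t (i'+1) q)) →
    ((PySem.List.enumerate l ((s : Int) + 1)).foldl (pvAltInner (p.getD i' ' ') prev) cur).length = t.length + 1 ∧
    (∀ q, q < t.length + 1 → ((PySem.List.enumerate l ((s : Int) + 1)).foldl (pvAltInner (p.getD i' ' ') prev) cur).getD q (0,0) = (pvDm p t (i'+1) q, pvOm p t (i'+1) q)) := by
  intro l
  induction l with
  | nil =>
    intro s cur hdrop hlen hclen hcur
    simp only [PySem.List.enumerate_nil, List.foldl_nil]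
    have hs : s = t.length := by simpa using hlen
    subst hs
    exact ⟨hclen, hcur⟩
  | cons c l' ihl =>
    intro s cur hdrop hlen hclen hcur
    have hs : s < t.length := by have h := hlen; simp only [List.length_cons] at h; omega
    have hcd : t[s] :: t.drop (s+1) = t.drop s := List.getElem_cons_drop hs
    rw [hdrop] at hcd
    obtain ⟨hc, hdrop'⟩ := List.cons.inj hcd.symm
    have hdrop' : t.drop (s+1) = l' := hdrop'.symm
    have htg : t.getD s ' ' = c := by
      rw [List.getD_eq_getElem?_getD, List.getElem?_eq_getElem hs, hc]; rfl
    rw [PySem.List.enumerate_cons, List.foldl_cons]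
    have hstep : pvAltInner (p.getD i' ' ') prev cur ((s:Int)+1, c) =
        cur ++ [(pvDm p t (i'+1) (s+1), pvOm p t (i'+1) (s+1))] := by
      unfold pvAltInner
      have e1 : ((s:Int)+1) = ((s+1 : Nat) : Int) := by push_cast; ring
      have e2 : ((s:Int)+1-1) = ((s : Nat) : Int) := by ring
      simp only [e2]
      rw [show PySem.List.pyGetD prev ((s:Int)+1) (0,0) = prev.getD (s+1) (0,0) by
            rw [e1, PySem.List.pyGetD_natCast]]
      rw [PySem.List.pyGetD_natCast, PySem.List.pyGetD_natCast]
      rw [hprev (s+1) (by omega), hcur s (by omega), hprev s (by omega)]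
      have hd : min (pvDm p t (i'+1) s + 1)
          (min (pvDm p t i' (s+1) + 1) (pvDm p t i' s + pvSubCost (p.getD i' ' ') c)) =
          pvDm p t (i'+1) (s+1) := by rw [← htg, pvDm]
      rw [hd]
      have ho : (if pvDm p t (i'+1) (s+1) = pvDm p t i' (s+1) + 1 then pvOm p t i' (s+1)
          else if pvDm p t (i'+1) (s+1) = pvDm p t (i'+1) s + 1 then pvOm p t (i'+1) s
          else pvOm p t i' s) = pvOm p t (i'+1) (s+1) := by rw [pvOm]
      rw [ho]
    rw [hstep]
    have e3 : ((s:Int)+1)+1 = (((s+1) : Nat) : Int) + 1 := by push_cast; ring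
    rw [e3]
    refine ihl (s+1) _ hdrop' (by simp at hlen ⊢; omega) (by simp [hclen]) ?_
    intro q hq
    by_cases hqs : q < s + 1
    · rw [List.getD_eq_getElem?_getD, List.getElem?_append_left (by omega),
          ← List.getD_eq_getElem?_getD, hcur q hqs]
    · have hq1 : q = s + 1 := by omega
      subst hq1
      rw [List.getD_eq_getElem?_getD, List.getElem?_append_right (by omega), hclen]
      simp

-- B's outer loop advances the (distance, origin) row over the pattern
theorem pv_B_outer (p t : List Char) :
    ∀ (l : List Char) (s : Nat) (prev : List (Int × Int)),
    p.drop s = l → s + l.length = p.length → prev.length = t.length + 1 →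
    (∀ q, q < t.length + 1 → prev.getD q (0,0) = (pvDm p t s q, pvOm p t s q)) →
    ((PySem.List.enumerate l ((s : Int) + 1)).foldl (pvAltOuter t) prev).length = t.length + 1 ∧
    (∀ q, q < t.length + 1 → ((PySem.List.enumerate l ((s : Int) + 1)).foldl (pvAltOuter t) prev).getD q (0,0) = (pvDm p t p.length q, pvOm p t p.length q)) := by
  intro l
  induction l with
  | nil =>
    intro s prev hdrop hlen hplen hprev
    simp only [PySem.List.enumerate_nil, List.foldl_nil]
    have hs : s = p.length := by simpa using hlen
    subst hs
    exact ⟨hplen, hprev⟩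
  | cons c l' ihl =>
    intro s prev hdrop hlen hplen hprev
    have hs : s < p.length := by have h := hlen; simp only [List.length_cons] at h; omega
    have hcd : p[s] :: p.drop (s+1) = p.drop s := List.getElem_cons_drop hs
    rw [hdrop] at hcd
    obtain ⟨hc, hdrop'⟩ := List.cons.inj hcd.symm
    have hdrop' : p.drop (s+1) = l' := hdrop'.symm
    have hpg : p.getD s ' ' = c := by
      rw [List.getD_eq_getElem?_getD, List.getElem?_eq_getElem hs, hc]; rfl
    rw [PySem.List.enumerate_cons, List.foldl_cons]
    have hcur0 : [((s:Int)+1, (PySem.List.pyGetD prev 0 (0, 0)).2)] =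
        [(pvDm p t (s+1) 0, pvOm p t (s+1) 0)] := by
      have h1 : (PySem.List.pyGetD prev 0 ((0:Int), (0:Int))).2 = pvOm p t s 0 := by
        rw [PySem.List.pyGetD_zero, hprev 0 (by omega)]
      have h2 : pvDm p t (s+1) 0 = (s:Int)+1 := by rw [pvDm_zero_right]; push_cast; ring
      have h3 : pvOm p t (s+1) 0 = pvOm p t s 0 := by rw [pvOm]
      rw [h1, h2, h3]
    have hstep : pvAltOuter t prev ((s:Int)+1, c) =
        (PySem.List.enumerate t (((0:Nat):Int)+1)).foldl (pvAltInner (p.getD s ' ') prev)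
          [(pvDm p t (s+1) 0, pvOm p t (s+1) 0)] := by
      unfold pvAltOuter
      rw [hcur0, hpg]
      norm_num
    rw [hstep]
    obtain ⟨r1, r2⟩ := pv_B_inner p t s prev hprev t 0
      [(pvDm p t (s+1) 0, pvOm p t (s+1) 0)] rfl (by simp) (by simp)
      (fun q hq => by
        have hq0 : q = 0 := by omega
        subst hq0; rfl)
    rw [show ((s:Int)+1)+1 = (((s+1:Nat)):Int)+1 from by push_cast; ring]
    exact ihl (s+1) _ hdrop' (by have h := hlen; simp only [List.length_cons] at h; omega) r1 r2

theorem pvDm_zero_left (p t : List Char) (j : Nat) : pvDm p t 0 j = 0 := by simp [pvDm]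

theorem pvOm_zero_left (p t : List Char) (j : Nat) : pvOm p t 0 j = (j : Int) := by simp [pvOm]

-- B's initial row [(0, j) for j in range(n+1)]
theorem pv_prev0 (t : List Char) :
    ((PySem.List.pyRange 0 ((t.length : Int) + 1) 1).map (fun j => ((0:Int), j))).length = t.length + 1 ∧
    (∀ q, q < t.length + 1 → ((PySem.List.pyRange 0 ((t.length : Int) + 1) 1).map (fun j => ((0:Int), j))).getD q ((0:Int),(0:Int)) = ((0:Int), (q:Int))) := by
  rw [show ((t.length : Int) + 1) = ((t.length + 1 : Nat) : Int) from by push_cast; ring,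
      PySem.List.pyRange_zero_natCast, List.map_map]
  constructor
  · simp
  · intro q hq
    rw [PySem.List.getD_map_range _ _ _ _ hq]
    rfl

-- B's final pass: filter by distance, keep origins
theorem pv_B_tail (p t : List Char) (mm : Int) :
    ∀ (l : List (Int × Int)) (s : Nat),
    (∀ q, q < l.length → l.getD q ((0:Int),(0:Int)) = (pvDm p t p.length (s+q), pvOm p t p.length (s+q))) →
    (l.filter (fun x => decide (x.1 ≤ mm))).map (fun x => x.2) =
    ((List.range' s l.length).filter (fun j => decide (pvDm p t p.length j ≤ mm))).map (fun j => pvOm p t p.length j) := by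
  intro l
  induction l with
  | nil => intro s _; simp
  | cons x l' ihl =>
    intro s hl
    have hx : x = (pvDm p t p.length s, pvOm p t p.length s) := by simpa using hl 0 (by simp)
    rw [List.length_cons, List.range'_succ, List.filter_cons, List.filter_cons]
    have hrec := ihl (s+1) (fun q hq => by
      have h := hl (q+1) (by simp only [List.length_cons]; omega)
      rw [List.getD_cons_succ] at h
      rw [show (s+1)+q = s+(q+1) from by omega]
      exact h)
    by_cases hc : pvDm p t p.length s ≤ mm
    · rw [hx]
      simp only [hc, decide_true, if_true, List.map_cons]
      rw [hrec]
    · rw [hx]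
      simp only [hc, decide_false, Bool.false_eq_true, if_false]
      rw [hrec]

-- A's final pass: collect qualifying end indices and backtrace each
theorem pv_A_tail (p t : List Char) (D : List (List Int)) (mm : Int)
    (hbt : ∀ e, e ≤ t.length → pvBtLoop p t D (p.length + t.length + 1) (p.length : Int) (e : Int) = pvOm p t p.length e) :
    ∀ (l : List Int) (s : Nat), s + l.length = t.length + 1 →
    (∀ q, q < l.length → l.getD q 0 = pvDm p t p.length (s+q)) →
    (((PySem.List.enumerate l (s : Int)).filter (fun x => decide (x.2 ≤ mm))).map (fun x => x.1)).map
      (fun e => pvBtLoop p t D (p.length + t.length + 1) (p.length : Int) e) =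
    ((List.range' s l.length).filter (fun j => decide (pvDm p t p.length j ≤ mm))).map (fun j => pvOm p t p.length j) := by
  intro l
  induction l with
  | nil => intro s _ _; simp [PySem.List.enumerate_nil]
  | cons x l' ihl =>
    intro s hs hl
    have hx : x = pvDm p t p.length s := by simpa using hl 0 (by simp)
    have hsn : s ≤ t.length := by simp only [List.length_cons] at hs; omega
    rw [PySem.List.enumerate_cons, List.length_cons, List.range'_succ, List.filter_cons, List.filter_cons]
    have hrec := ihl (s+1) (by simp only [List.length_cons] at hs; omega) (fun q hq => by
      have h := hl (q+1) (by simp only [List.length_cons]; omega)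
      rw [List.getD_cons_succ] at h
      rw [show (s+1)+q = s+(q+1) from by omega]
      exact h)
    rw [show ((s:Int) + 1) = ((s+1 : Nat) : Int) from by push_cast; ring]
    by_cases hc : pvDm p t p.length s ≤ mm
    · rw [hx]
      simp only [hc, decide_true, if_true, List.map_cons]
      rw [hrec, hbt s hsn]
    · rw [hx]
      simp only [hc, decide_false, Bool.false_eq_true, if_false]
      rw [hrec]

theorem pv_main (pattern text : String) (max_mismatches : Int) :
    get_occurences_with_dynamic_programming pattern text max_mismatches =
    get_occurences_with_dynamic_programming_alt pattern text max_mismatches := by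
  obtain ⟨f1, f2, f3⟩ := pv_buildD pattern.toList text.toList
  simp only [get_occurences_with_dynamic_programming, get_occurences_with_dynamic_programming_alt]
  set p := pattern.toList with hp
  set t := text.toList with ht
  set D := pvBuildD p t with hDdef
  have hlast : (PySem.List.pyGet? D (-1)).getD [] = D.getD p.length [] := by
    rw [PySem.List.pyGet?_neg_one, List.getLast?_eq_getElem?, f1]
    rw [show p.length + 1 - 1 = p.length from by omega, ← List.getD_eq_getElem?_getD]
  have hlen_last : (D.getD p.length []).length = t.length + 1 := f2 _ (by omega)
  have hget_last : ∀ q, q < t.length + 1 → (D.getD p.length []).getD q 0 = pvDm p t p.length q :=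
    fun q hq => f3 p.length q (by omega) hq
  -- B side reduces to the canonical filtered origin list
  obtain ⟨p1, p2⟩ := pv_prev0 t
  obtain ⟨b1, b2⟩ := pv_B_outer p t p 0 _ rfl (by simp)
    p1 (fun q hq => by rw [p2 q hq, pvDm_zero_left, pvOm_zero_left])
  rw [show (((0:Nat)):Int)+1 = (1:Int) from by norm_num] at b1 b2
  have hB : ((((PySem.List.enumerate p 1).foldl (pvAltOuter t)
        ((PySem.List.pyRange 0 ((t.length : Int) + 1) 1).map (fun j => ((0:Int), j)))).filter
        (fun x => decide (x.1 ≤ max_mismatches))).map (fun x => x.2)) =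
      ((List.range' 0 (t.length + 1)).filter (fun j => decide (pvDm p t p.length j ≤ max_mismatches))).map
        (fun j => pvOm p t p.length j) := by
    rw [show ((List.range' 0 (t.length + 1)) : List Nat) =
          List.range' 0 ((PySem.List.enumerate p 1).foldl (pvAltOuter t)
            ((PySem.List.pyRange 0 ((t.length : Int) + 1) 1).map (fun j => ((0:Int), j)))).length from by rw [b1]]
    exact pv_B_tail p t max_mismatches _ 0 (fun q hq => by
      rw [b2 q (by rw [← b1]; exact hq)]
      simp)
  rw [hlast]
  cases hmin : PySem.List.min? (D.getD p.length []) (fun x => x) with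
  | none =>
    exact absurd ((PySem.List.min?_eq_none_iff _ _).mp hmin)
      (by intro h; rw [h] at hlen_last; simp at hlen_last)
  | some mn =>
    dsimp only
    by_cases hgt : mn > max_mismatches
    · rw [if_pos hgt, hB]
      symm
      rw [List.map_eq_nil_iff, List.filter_eq_nil_iff]
      intro j hj
      have hjn : j < t.length + 1 := by
        rcases List.mem_range'.mp hj with ⟨i, hi, rfl⟩; omega
      have hmem : pvDm p t p.length j ∈ (D.getD p.length []) := by
        have hg := hget_last j hjn
        rw [List.getD_eq_getElem?_getD, List.getElem?_eq_getElem (by omega : j < (D.getD p.length []).length)] at hg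
        simp only [Option.getD_some] at hg
        rw [← hg]
        exact List.getElem_mem _
      have hmn := PySem.List.min?_isMin hmin _ hmem
      simp only [decide_eq_true_eq]
      omega
    · rw [if_neg hgt]
      have hbt : ∀ e, e ≤ t.length → pvBtLoop p t D (p.length + t.length + 1) (p.length : Int) (e : Int) = pvOm p t p.length e :=
        fun e he => pv_bt p t D f3 _ p.length e le_rfl he (by omega)
      have hA := pv_A_tail p t D max_mismatches hbt (D.getD p.length []) 0
        (by rw [hlen_last]; omega) (fun q hq => by rw [hget_last q (by rw [← hlen_last]; exact hq)]; simp)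
      rw [show (((0:Nat)):Int) = (0:Int) from rfl, hlen_last] at hA
      rw [hA, hB]

-- ===== VERDICT (by name: the statement is the Claim_ definition above) =====
theorem get_occurences_with_dynamic_programming_spec : Claim_equal_get_occurences_with_dynamic_programming := by
  intro pattern text max_mismatches _ _
  unfold Spec_get_occurences_with_dynamic_programming
  exact pv_main pattern text max_mismatches
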